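-- pv_equiv track=rewrite | github.com/Chakib-L/adafuse | adafuse/llm_selector.py | _merge_singleton_chunks
-- ===== SOURCE A (Python) =====
-- from typing import Any, Dict, List, Optional
--
-- def _merge_singleton_chunks(chunks: List[List[str]]) -> List[List[str]]:
--     """Fusionne les clusters d'un seul agent avec un voisin adjacent."""
--     chunks = [list(c) for c in chunks if c]
--     changed = True
--     while changed and len(chunks) > 1:
--         changed = False
--         for i, c in enumerate(chunks):
--             if len(c) != 1:
--                 continue
--             if i + 1 < len(chunks):
--                 chunks[i + 1] = c + chunks[i + 1]
--                 chunks.pop(i)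
--             else:
--                 chunks[-2].extend(c)
--                 chunks.pop()
--             changed = True
--             break
--     return chunks
-- ===== SOURCE B (Python) =====
-- from typing import List
--
-- def _merge_singleton_chunks(chunks: List[List[str]]) -> List[List[str]]:
--     """One left-to-right pass: a pending singleton is carried forward and
--     prepended to the next chunk; a trailing singleton is appended to the last
--     emitted chunk."""
--     result: List[List[str]] = []
--     carry: List[str] = []
--     for c in chunks:
--         if not c:
--             continue
--         cur = carry + c
--         if len(cur) >= 2:
--             result.append(cur)
--             carry = []
--         else:
--             carry = cur
--     if carry:
--         if result:
--             result[-1] = result[-1] + carry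
--         else:
--             result.append(carry)
--     return result
-- ===== Notes on version B (the rewrite author's own statement) =====
-- stated objective: alternative
-- what changed: Replaced A's restart-the-scan-after-every-merge while/for loop by a single left-to-right fold that carries a pending singleton forward, prepending it to the next chunk and appending a trailing singleton to the last emitted chunk.
import Mathlib
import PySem

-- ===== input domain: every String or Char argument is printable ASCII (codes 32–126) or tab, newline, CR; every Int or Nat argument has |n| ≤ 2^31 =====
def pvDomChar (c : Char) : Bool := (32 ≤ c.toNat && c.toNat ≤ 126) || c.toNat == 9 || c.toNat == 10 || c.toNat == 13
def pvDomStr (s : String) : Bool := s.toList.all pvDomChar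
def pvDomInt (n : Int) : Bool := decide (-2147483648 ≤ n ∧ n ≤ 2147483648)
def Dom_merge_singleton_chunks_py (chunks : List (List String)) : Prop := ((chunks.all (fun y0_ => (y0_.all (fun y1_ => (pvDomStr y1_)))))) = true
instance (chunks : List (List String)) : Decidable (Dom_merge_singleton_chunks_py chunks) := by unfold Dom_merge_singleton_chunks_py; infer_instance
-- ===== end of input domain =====

-- B replaces A's restart-after-every-merge loop by a single left-to-right fold
-- carrying a pending singleton (alternative decomposition; same return value).

-- ===== PORT A =====
-- A's inner `for … break`: find the FIRST singleton chunk; merge it into the next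
-- chunk (or, if it is the last chunk, extend the previous one); `none` = no merge.
def pvMergeStep : List (List String) → Option (List (List String))
  | [] => none
  | [_] => none
  | c :: r :: rs =>
    if c.length = 1 then some ((c ++ r) :: rs)
    else if rs = [] ∧ r.length = 1 then some [c ++ r]
    else (pvMergeStep (r :: rs)).map (c :: ·)

theorem pvMergeStep_length : ∀ (l l' : List (List String)), pvMergeStep l = some l' → l'.length + 1 = l.length := by
  intro l
  induction l with
  | nil => intro l' h; simp [pvMergeStep] at h
  | cons c t ih =>
    intro l' h
    match t with
    | [] => simp [pvMergeStep] at h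
    | r :: rs =>
      simp only [pvMergeStep] at h
      split_ifs at h with h1 h2
      · cases h; simp
      · cases h; simp [h2.1]
      · rcases Option.map_eq_some_iff.mp h with ⟨o, ho, rfl⟩
        have := ih o ho
        simpa using this

-- A's `while changed and len(chunks) > 1` loop.
def pvLoopA (l : List (List String)) : List (List String) :=
  if 1 < l.length then
    match h : pvMergeStep l with
    | some l' => pvLoopA l'
    | none => l
  else l
termination_by l.length
decreasing_by
  have := pvMergeStep_length l l' h
  omega

-- `chunks = [list(c) for c in chunks if c]` then the while loop.
def merge_singleton_chunks_py (chunks : List (List String)) : List (List String) :=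
  pvLoopA (chunks.filter (fun c => !c.isEmpty))

-- ===== PORT B =====
-- Source B's loop body: skip empty chunks, carry a pending singleton forward.
def pvStepB (s : List (List String) × List String) (c : List String) : List (List String) × List String :=
  if c.isEmpty then s
  else
    let cur := s.2 ++ c
    if 2 ≤ cur.length then (s.1 ++ [cur], []) else (s.1, cur)

-- Source B's finalisation after the loop.
def pvFinishB (s : List (List String) × List String) : List (List String) :=
  if s.2.isEmpty then s.1
  else match s.1 with
    | [] => [s.2]
    | _ => s.1.dropLast ++ [(s.1.getLast?.getD []) ++ s.2]

def merge_singleton_chunks_py_alt (chunks : List (List String)) : List (List String) :=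
  pvFinishB (chunks.foldl pvStepB ([], []))

-- ===== PRECONDITION & SPEC =====
def Spec_merge_singleton_chunks_py (chunks : List (List String)) (out : List (List String)) : Prop := out = merge_singleton_chunks_py_alt chunks
instance (chunks : List (List String)) (out : List (List String)) : Decidable (Spec_merge_singleton_chunks_py chunks out) := by unfold Spec_merge_singleton_chunks_py; infer_instance

-- ===== CLAIM (what is proved, stated in full; the proofs are below) =====
def Claim_equal_merge_singleton_chunks_py : Prop := ∀ (chunks : List (List String)), Dom_merge_singleton_chunks_py chunks → Spec_merge_singleton_chunks_py chunks (merge_singleton_chunks_py chunks)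

-- ===== LEMMAS AND PROOFS =====

theorem pvStepB_skip (s : List (List String) × List String) (c : List String) (h : c.isEmpty) : pvStepB s c = s := by
  unfold pvStepB
  rw [if_pos h]

theorem pvStepB_emit (res : List (List String)) (carry : List String) (c : List String) (h : c.isEmpty = false) (h2 : 2 ≤ carry.length + c.length) : pvStepB (res, carry) c = (res ++ [carry ++ c], []) := by
  unfold pvStepB
  rw [if_neg (by simp [h]), if_pos (by simp; omega)]

theorem pvStepB_carry (res : List (List String)) (carry : List String) (c : List String) (h : c.isEmpty = false) (h2 : carry.length + c.length < 2) : pvStepB (res, carry) c = (res, carry ++ c) := by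
  unfold pvStepB
  rw [if_neg (by simp [h]), if_neg (by simp; omega)]

theorem pvFinishB_nil (res : List (List String)) : pvFinishB (res, []) = res := by
  simp [pvFinishB]

theorem pvFinishB_carry_nil (c : List String) (h : c.isEmpty = false) : pvFinishB ([], c) = [c] := by
  simp [pvFinishB, h]

theorem pvFinishB_carry_concat (res : List (List String)) (x c : List String) (h : c.isEmpty = false) : pvFinishB (res ++ [x], c) = res ++ [x ++ c] := by
  have hne : res ++ [x] ≠ ([] : List (List String)) := by simp
  simp only [pvFinishB, h, Bool.false_eq_true, if_false]
  rw [List.dropLast_concat, List.getLast?_concat]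
  cases res <;> simp

theorem pvLoopA_small (l : List (List String)) (h : ¬ 1 < l.length) : pvLoopA l = l := by
  rw [pvLoopA, if_neg h]

theorem pvLoopA_some (l l' : List (List String)) (h1 : 1 < l.length) (h : pvMergeStep l = some l') : pvLoopA l = pvLoopA l' := by
  rw [pvLoopA, if_pos h1]
  split
  · next x heq => rw [heq] at h; cases h; rfl
  · next heq => rw [heq] at h; cases h

theorem pvLoopA_none (l : List (List String)) (h1 : 1 < l.length) (h : pvMergeStep l = none) : pvLoopA l = l := by
  rw [pvLoopA, if_pos h1]
  split
  · next x heq => rw [heq] at h; cases h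
  · rfl

theorem len_pos_of_ne_nil (c : List String) (h : c ≠ []) : 1 ≤ c.length := by
  have : c.length ≠ 0 := by simpa [List.length_eq_zero_iff] using h
  omega

theorem pvMergeStep_nonempty : ∀ (l l' : List (List String)), (∀ c ∈ l, c ≠ []) → pvMergeStep l = some l' → ∀ c ∈ l', c ≠ [] := by
  intro l
  induction l with
  | nil => intro l' _ h; simp [pvMergeStep] at h
  | cons c t ih =>
    intro l' hne h
    match t with
    | [] => simp [pvMergeStep] at h
    | r :: rs =>
      simp only [pvMergeStep] at h
      split_ifs at h with h1 h2
      · cases h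
        intro x hx
        rcases List.mem_cons.mp hx with rfl | hx
        · have := hne r (by simp); simp [this]
        · exact hne x (by simp [hx])
      · cases h
        intro x hx
        rcases List.mem_cons.mp hx with rfl | hx
        · have := hne r (by simp); simp [this]
        · simp at hx
      · rcases Option.map_eq_some_iff.mp h with ⟨o, ho, rfl⟩
        intro x hx
        rcases List.mem_cons.mp hx with rfl | hx
        · exact hne x (by simp)
        · exact ih o (fun y hy => hne y (by simp [hy])) ho x hx

theorem pvMergeStep_none_big : ∀ (l : List (List String)), (∀ c ∈ l, c ≠ []) → pvMergeStep l = none → 2 ≤ l.length → ∀ c ∈ l, 2 ≤ c.length := by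
  intro l
  induction l with
  | nil => intro _ _ h; simp at h
  | cons c t ih =>
    intro hne h hlen
    match t with
    | [] => simp at hlen
    | r :: rs =>
      simp only [pvMergeStep] at h
      rcases Decidable.em (c.length = 1) with h1 | h1
      · rw [if_pos h1] at h; cases h
      · rw [if_neg h1] at h
        rcases Decidable.em (rs = [] ∧ r.length = 1) with h2 | h2
        · rw [if_pos h2] at h; cases h
        · rw [if_neg h2] at h
          have hmap : pvMergeStep (r :: rs) = none := by
            simpa using h
          have hc : 2 ≤ c.length := by
            have := len_pos_of_ne_nil c (hne c (by simp))
            omega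
          intro x hx
          rcases List.mem_cons.mp hx with rfl | hx
          · exact hc
          · match rs with
            | [] =>
              simp at hx; subst hx
              have hr : x.length ≠ 1 := fun h' => h2 ⟨rfl, h'⟩
              have := len_pos_of_ne_nil x (hne x (by simp))
              omega
            | q :: qs =>
              exact ih (fun y hy => hne y (by simp [hy])) hmap (by simp) x hx

theorem pvFoldB_big : ∀ (l : List (List String)) (res : List (List String)), (∀ c ∈ l, 2 ≤ c.length) → l.foldl pvStepB (res, []) = (res ++ l, []) := by
  intro l
  induction l with
  | nil => intro res _; simp
  | cons c t ih =>
    intro res hbig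
    have hc := hbig c (by simp)
    have hcE : c.isEmpty = false := by
      cases c with
      | nil => simp at hc
      | cons a b => simp
    rw [List.foldl_cons, pvStepB_emit res [] c hcE (by simp; omega), List.nil_append]
    rw [ih (res ++ [c]) (fun y hy => hbig y (by simp [hy]))]
    simp

theorem pvKeyStep : ∀ (l l' : List (List String)) (res : List (List String)), (∀ c ∈ l, c ≠ []) → pvMergeStep l = some l' →
    pvFinishB (l.foldl pvStepB (res, [])) = pvFinishB (l'.foldl pvStepB (res, [])) := by
  intro l
  induction l with
  | nil => intro l' res _ h; simp [pvMergeStep] at h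
  | cons c t ih =>
    intro l' res hne h
    match t with
    | [] => simp [pvMergeStep] at h
    | r :: rs =>
      have hcne : c ≠ [] := hne c (by simp)
      have hrne : r ≠ [] := hne r (by simp)
      have hcE : c.isEmpty = false := by simpa using hcne
      have hrE : r.isEmpty = false := by simpa using hrne
      have hrlen : 1 ≤ r.length := len_pos_of_ne_nil r hrne
      have hcrE : (c ++ r).isEmpty = false := by simp [hcne]
      simp only [pvMergeStep] at h
      split_ifs at h with h1 h2
      · -- first singleton merges into the next chunk
        cases h
        rw [List.foldl_cons, pvStepB_carry res [] c hcE (by simp; omega), List.nil_append,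
            List.foldl_cons, pvStepB_emit res c r hrE (by omega),
            List.foldl_cons, pvStepB_emit res [] (c ++ r) hcrE (by simp; omega), List.nil_append]
      · -- trailing singleton extends the previous chunk
        obtain ⟨rfl, hr1⟩ := h2
        cases h
        have hclen : 2 ≤ c.length := by
          have := len_pos_of_ne_nil c hcne
          omega
        rw [List.foldl_cons, pvStepB_emit res [] c hcE (by simp; omega), List.nil_append,
            List.foldl_cons, pvStepB_carry (res ++ [c]) [] r hrE (by simp; omega), List.nil_append,
            List.foldl_nil,
            List.foldl_cons, pvStepB_emit res [] (c ++ r) hcrE (by simp; omega), List.nil_append,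
            List.foldl_nil,
            pvFinishB_carry_concat res c r hrE, pvFinishB_nil]
      · -- first chunk untouched; recurse on the tail
        rcases Option.map_eq_some_iff.mp h with ⟨o, ho, rfl⟩
        have hclen : 2 ≤ c.length := by
          have := len_pos_of_ne_nil c hcne
          omega
        have hc2 : 2 ≤ List.length ([] : List String) + c.length := by simp; omega
        conv_lhs => rw [List.foldl_cons, pvStepB_emit res [] c hcE hc2, List.nil_append]
        conv_rhs => rw [List.foldl_cons, pvStepB_emit res [] c hcE hc2, List.nil_append]
        exact ih o (res ++ [c]) (fun y hy => hne y (by simp [hy])) ho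

theorem pvMain : ∀ (n : ℕ) (l : List (List String)), l.length ≤ n → (∀ c ∈ l, c ≠ []) →
    pvLoopA l = pvFinishB (l.foldl pvStepB ([], [])) := by
  intro n
  induction n with
  | zero =>
    intro l hl _
    have : l = [] := by
      cases l with
      | nil => rfl
      | cons a b => simp at hl
    subst this
    rw [pvLoopA_small [] (by simp), List.foldl_nil, pvFinishB_nil]
  | succ n ih =>
    intro l hl hne
    match l with
    | [] => rw [pvLoopA_small [] (by simp), List.foldl_nil, pvFinishB_nil]
    | [c] =>
      have hcne : c ≠ [] := hne c (by simp)
      have hcE : c.isEmpty = false := by simpa using hcne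
      rw [pvLoopA_small [c] (by simp), List.foldl_cons, List.foldl_nil]
      by_cases h2 : 2 ≤ c.length
      · rw [pvStepB_emit [] [] c hcE (by simp; omega), List.nil_append, pvFinishB_nil]
        simp
      · rw [pvStepB_carry [] [] c hcE (by simp; omega), List.nil_append]
        exact (pvFinishB_carry_nil c hcE).symm
    | c :: r :: rs =>
      cases hm : pvMergeStep (c :: r :: rs) with
      | some l' =>
        have hlen := pvMergeStep_length _ _ hm
        have hone := pvMergeStep_nonempty _ _ hne hm
        rw [pvLoopA_some _ _ (by simp) hm]
        rw [ih l' (by simp only [List.length_cons] at hl hlen ⊢; omega) hone]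
        exact (pvKeyStep _ _ [] hne hm).symm
      | none =>
        have hbig := pvMergeStep_none_big _ hne hm (by simp)
        rw [pvLoopA_none _ (by simp) hm, pvFoldB_big _ [] hbig, pvFinishB_nil]
        simp

theorem pvFilterB : ∀ (l : List (List String)) (s : List (List String) × List String),
    l.foldl pvStepB s = (l.filter (fun c => !c.isEmpty)).foldl pvStepB s := by
  intro l
  induction l with
  | nil => intro s; rfl
  | cons c t ih =>
    intro s
    by_cases hc : c.isEmpty
    · simp only [List.foldl_cons, List.filter_cons, hc]
      rw [pvStepB_skip s c hc]
      simpa using ih s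
    · simp only [List.foldl_cons, List.filter_cons]
      rw [if_pos (by simpa using hc)]
      simpa using ih (pvStepB s c)

-- ===== VERDICT (by name: the statement is the Claim_ definition above) =====
theorem merge_singleton_chunks_py_spec : Claim_equal_merge_singleton_chunks_py := by
  intro chunks _
  unfold Spec_merge_singleton_chunks_py merge_singleton_chunks_py merge_singleton_chunks_py_alt
  rw [pvFilterB]
  exact pvMain (chunks.filter (fun c => !c.isEmpty)).length _ le_rfl
    (by intro c hc; have := List.of_mem_filter hc; simpa using this)
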